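-- pv_equiv track=rewrite | github.com/m0seng/project-noteblock | v2/pianoroll.py | black_notes
-- ===== SOURCE A (Python) =====
-- import math
--
-- def black_notes(pitch_count: int) -> list[int]:
--     """Helper function which returns a list of black notes within the given pitch range."""
--     result = []
--     octave_black_notes = [0, 2, 4, 7, 9]
--     octave_count = math.ceil(pitch_count / 12)
--     for octave in range(octave_count):
--         result.extend(n + 12*octave for n in octave_black_notes)
--     result = filter(lambda n: n < pitch_count, result)
--     return result
-- ===== SOURCE B (Python) =====
-- def black_notes(pitch_count: int) -> list[int]:
--     """Helper function which returns a list of black notes within the given pitch range."""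
--     return filter(lambda n: n % 12 in (0, 2, 4, 7, 9), range(pitch_count))
-- ===== Notes on version B (the rewrite author's own statement) =====
-- stated objective: idiomatic
-- what changed: B drops the tile-octave-list-then-filter-by-bound construction (ceiling-division octave count, extend per octave, bound filter) and instead lazily filters range(pitch_count) by the black-note pitch-class predicate on n mod twelve.
import Mathlib
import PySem

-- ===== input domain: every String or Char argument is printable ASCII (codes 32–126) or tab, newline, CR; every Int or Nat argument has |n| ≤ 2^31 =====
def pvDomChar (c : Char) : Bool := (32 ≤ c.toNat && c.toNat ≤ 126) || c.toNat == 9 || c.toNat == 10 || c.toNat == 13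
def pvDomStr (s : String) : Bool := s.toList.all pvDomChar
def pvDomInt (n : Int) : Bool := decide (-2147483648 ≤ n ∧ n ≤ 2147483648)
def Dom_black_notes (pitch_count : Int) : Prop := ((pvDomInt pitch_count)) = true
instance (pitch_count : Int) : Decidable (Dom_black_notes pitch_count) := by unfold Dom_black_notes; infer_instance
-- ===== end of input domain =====

-- B replaces A's tile-octaves-then-filter-by-bound construction with a single lazy
-- filter of the black-note pitch-class predicate (n mod twelve) over range(pitch_count)
-- (idiomatic; same values in the same order; both return an iterator of ints).

-- ===== PORT A =====
def black_notes (pitch_count : Int) : List Int :=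
  let octave_black_notes : List Int := [0, 2, 4, 7, 9]
  -- math.ceil(pitch_count / 12) on an int equals -((-pitch_count) // 12)
  let octave_count : Int := -(PySem.Int.floordiv (-pitch_count) 12)
  let result : List Int :=
    (PySem.List.pyRange 0 octave_count 1).foldl
      (fun result octave => result ++ octave_black_notes.map (fun n => n + 12 * octave)) []
  result.filter (fun n => decide (n < pitch_count))

-- ===== PORT B =====
def black_notes_alt (pitch_count : Int) : List Int :=
  (PySem.List.pyRange 0 pitch_count 1).filter
    (fun n => decide (PySem.Int.mod n 12 ∈ ([0, 2, 4, 7, 9] : List Int)))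

-- ===== PRECONDITION & SPEC =====
def Spec_black_notes (pitch_count : Int) (out : List Int) : Prop := out = black_notes_alt pitch_count
instance (pitch_count : Int) (out : List Int) : Decidable (Spec_black_notes pitch_count out) := by unfold Spec_black_notes; infer_instance

-- ===== CLAIM (what is proved, stated in full; the proofs are below) =====
def Claim_equal_black_notes : Prop := ∀ (pitch_count : Int), Dom_black_notes pitch_count → Spec_black_notes pitch_count (black_notes pitch_count)

-- ===== LEMMAS AND PROOFS =====

-- pitch-class predicate shared by the reasoning below
def pvBlack (n : Int) : Bool := decide (PySem.Int.mod n 12 ∈ ([0, 2, 4, 7, 9] : List Int))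

lemma pvBlack_shift (m : Nat) (j : Int) :
    pvBlack (12 * (m : Int) + j) = pvBlack j := by
  have h1 : PySem.Int.mod (12 * (m : Int) + j) 12 = (12 * (m : Int) + j) % 12 :=
    PySem.Int.mod_eq_emod_of_pos (by norm_num)
  have h2 : PySem.Int.mod j 12 = j % 12 := PySem.Int.mod_eq_emod_of_pos (by norm_num)
  have h3 : (12 * (m : Int) + j) % 12 = j % 12 := by omega
  simp only [pvBlack, h1, h2, h3]

lemma pvBlack_mul (m : Nat) : pvBlack (12 * (m : Int)) = true := by
  have := pvBlack_shift m 0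
  simpa using this

lemma chunk_eq (m : Nat) :
    (PySem.List.pyRange (12 * (m : Int)) (12 * (m : Int) + 12) 1).filter pvBlack
      = ([0, 2, 4, 7, 9] : List Int).map (fun n => n + 12 * (m : Int)) := by
  rw [PySem.List.pyRange_one,
    show (12 * (m : Int) + 12 - 12 * (m : Int)).toNat = 12 by omega,
    show List.range 12 = [0,1,2,3,4,5,6,7,8,9,10,11] by decide]
  simp only [List.map_cons, List.map_nil, List.filter_cons, List.filter_nil,
    Nat.cast_ofNat, Nat.cast_zero, Nat.cast_one, add_zero, pvBlack_shift, pvBlack_mul,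
    show pvBlack 1 = false from by decide, show pvBlack 2 = true from by decide,
    show pvBlack 3 = false from by decide, show pvBlack 4 = true from by decide,
    show pvBlack 5 = false from by decide, show pvBlack 6 = false from by decide,
    show pvBlack 7 = true from by decide, show pvBlack 8 = false from by decide,
    show pvBlack 9 = true from by decide, show pvBlack 10 = false from by decide,
    show pvBlack 11 = false from by decide, if_true]
  norm_num
  refine ⟨by ring, by ring, by ring, by ring⟩

lemma core_eq (m : Nat) :
    (PySem.List.pyRange 0 (m : Int) 1).foldl
        (fun result octave => result ++ ([0, 2, 4, 7, 9] : List Int).map (fun n => n + 12 * octave)) []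
      = (PySem.List.pyRange 0 (12 * (m : Int)) 1).filter pvBlack := by
  induction m with
  | zero => simp [PySem.List.pyRange_one_eq_nil]
  | succ m ih =>
    have hL : PySem.List.pyRange 0 ((m : Int) + 1) 1
        = PySem.List.pyRange 0 (m : Int) 1 ++ [(m : Int)] :=
      PySem.List.pyRange_one_succ_right (by exact_mod_cast Nat.zero_le m)
    have hR : PySem.List.pyRange 0 (12 * ((m : Int) + 1)) 1
        = PySem.List.pyRange 0 (12 * (m : Int)) 1
            ++ PySem.List.pyRange (12 * (m : Int)) (12 * (m : Int) + 12) 1 := by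
      have := PySem.List.pyRange_one_append 0 (12 * (m : Int)) (12 * (m : Int) + 12)
        (by positivity) (by omega)
      rw [show 12 * ((m : Int) + 1) = 12 * (m : Int) + 12 by ring]
      exact this
    push_cast
    rw [hL, hR, List.foldl_append, List.filter_append, ih, chunk_eq]
    simp

-- ===== VERDICT (by name: the statement is the Claim_ definition above) =====
theorem black_notes_spec : Claim_equal_black_notes := by
  intro pc _
  unfold Spec_black_notes black_notes black_notes_alt
  by_cases hpos : 0 < pc
  · -- octave_count q satisfies (q-1)*12 < pc ≤ q*12, and q ≥ 1
    set q : Int := -(PySem.Int.floordiv (-pc) 12) with hq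
    have hb := (PySem.Int.neg_floordiv_neg_eq_iff_of_pos (by norm_num : (0:Int) < 12)).mp hq.symm
    have hq0 : 0 < q := by nlinarith [hb.1, hb.2]
    have hqnat : ((q.toNat : Nat) : Int) = q := Int.toNat_of_nonneg hq0.le
    have hcore := core_eq q.toNat
    rw [hqnat] at hcore
    simp only []
    rw [hcore, List.filter_filter]
    have hsplit : PySem.List.pyRange 0 (12 * q) 1
        = PySem.List.pyRange 0 pc 1 ++ PySem.List.pyRange pc (12 * q) 1 :=
      PySem.List.pyRange_one_append 0 pc (12 * q) hpos.le (by linarith [hb.2])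
    rw [hsplit, List.filter_append]
    have h1 : (PySem.List.pyRange pc (12 * q) 1).filter
        (fun a => decide (a < pc) && pvBlack a) = [] := by
      apply List.filter_eq_nil_iff.mpr
      intro n hn
      have := (PySem.List.mem_pyRange_one.mp hn).1
      simp [show ¬ n < pc by omega]
    have h2 : (PySem.List.pyRange 0 pc 1).filter (fun a => decide (a < pc) && pvBlack a)
        = (PySem.List.pyRange 0 pc 1).filter pvBlack := by
      apply List.filter_congr
      intro n hn
      have := (PySem.List.mem_pyRange_one.mp hn).2
      simp [this]
    rw [h1, h2, List.append_nil]
    rfl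
  · -- pc ≤ 0: both sides are empty
    push Not at hpos
    have hA : -(PySem.Int.floordiv (-pc) 12) ≤ 0 := by
      have h0 : 0 ≤ PySem.Int.floordiv (-pc) 12 := by
        rw [PySem.Int.floordiv_eq_ediv_of_pos (by norm_num)]
        exact Int.ediv_nonneg (by omega) (by norm_num)
      omega
    simp only [PySem.List.pyRange_one_eq_nil hA, PySem.List.pyRange_one_eq_nil hpos,
      List.foldl_nil, List.filter_nil]
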